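-- pv_equiv track=rewrite | github.com/yaidiflor82242/AyP-4 | guia_fibonacci.py | caminos_restringidos
-- ===== SOURCE A (Python) =====
-- def caminos_restringidos(n):
--     """
--     1 o 2 escalones, PERO NO DOS 2 SEGUIDOS
--
--     DP: dp[i][0] = termina en 1
--         dp[i][1] = termina en 2
--     """
--     if n <= 0:
--         return 0
--     if n == 1:
--         return 1
--
--     dp = [[0, 0] for _ in range(n + 1)]
--     dp[1][0] = 1  # termina en 1
--
--     for i in range(2, n + 1):
--         dp[i][0] = dp[i-1][0] + dp[i-1][1]  # termina en 1
--         dp[i][1] = dp[i-2][0]               # termina en 2 (solo desde 1)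
--
--     return dp[n][0] + dp[n][1]
-- ===== SOURCE B (Python) =====
-- def caminos_restringidos(n):
--     # Same count as A, computed by O(log n) matrix exponentiation of the
--     # linear recurrence x_i = x_{i-1} + x_{i-3} instead of an O(n) DP table.
--     if n <= 0:
--         return 0
--     if n == 1:
--         return 1
--     if n == 2:
--         return 1
--     if n == 3:
--         return 2
--
--     def mul(A, B):
--         return [[sum(A[i][k] * B[k][j] for k in range(3)) for j in range(3)]
--                 for i in range(3)]
--
--     def matpow(M, k):
--         if k == 0:
--             return [[1, 0, 0], [0, 1, 0], [0, 0, 1]]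
--         H = matpow(M, k // 2)
--         S = mul(H, H)
--         return S if k % 2 == 0 else mul(S, M)
--
--     M = [[1, 0, 1], [1, 0, 0], [0, 1, 0]]
--     P = matpow(M, n - 3)
--     # P applied to (x3, x2, x1) = (1, 1, 1) gives (x_n, x_{n-1}, x_{n-2});
--     # the answer is x_n + x_{n-2}.
--     w = [sum(P[i][k] for k in range(3)) for i in range(3)]
--     return w[0] + w[2]
-- ===== Notes on version B (the rewrite author's own statement) =====
-- stated objective: faster
-- what changed: Replaced the O(n) DP over an (n+1)-entry table by O(log n) binary matrix exponentiation of the equivalent linear recurrence x_i = x_{i-1} + x_{i-3}.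
import Mathlib
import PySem

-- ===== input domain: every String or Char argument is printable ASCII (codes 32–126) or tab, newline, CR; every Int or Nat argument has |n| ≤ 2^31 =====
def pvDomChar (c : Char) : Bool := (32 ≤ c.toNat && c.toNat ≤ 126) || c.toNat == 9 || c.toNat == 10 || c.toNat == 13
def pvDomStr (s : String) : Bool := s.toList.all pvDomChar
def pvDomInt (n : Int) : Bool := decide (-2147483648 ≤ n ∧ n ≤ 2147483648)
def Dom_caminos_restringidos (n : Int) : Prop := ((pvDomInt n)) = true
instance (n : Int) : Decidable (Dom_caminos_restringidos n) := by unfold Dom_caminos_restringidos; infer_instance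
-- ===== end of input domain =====

-- B replaces A's O(n) DP table by O(log n) matrix exponentiation of the same recurrence.

-- ===== PORT A =====
-- Literal port of A's DP: a list dp of (n+1) pairs, dp[1][0] = 1, then for i in
-- range(2, n+1) the two in-place assignments; all indices are in range for n ≥ 2,
-- so pyGetD/pySetD are exact here.
def caminos_restringidos (n : Int) : Int :=
  if n ≤ 0 then 0
  else if n = 1 then 1
  else
    let dp : List (Int × Int) := List.replicate (n + 1).toNat (0, 0)
    let dp := PySem.List.pySetD dp 1 (1, 0)
    let dp := (PySem.List.pyRange 2 (n + 1) 1).foldl (fun dp i =>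
      -- dp[i][0] = dp[i-1][0] + dp[i-1][1]
      let p := PySem.List.pyGetD dp (i - 1) (0, 0)
      let c := PySem.List.pyGetD dp i (0, 0)
      let dp := PySem.List.pySetD dp i (p.1 + p.2, c.2)
      -- dp[i][1] = dp[i-2][0]
      let q := PySem.List.pyGetD dp (i - 2) (0, 0)
      let c2 := PySem.List.pyGetD dp i (0, 0)
      PySem.List.pySetD dp i (c2.1, q.1)) dp
    let f := PySem.List.pyGetD dp n (0, 0)
    f.1 + f.2

-- ===== PORT B =====
-- Python's 3×3 list-of-lists matrices are ported as a flat 9-field structure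
-- (row-major); mul/matpow/the final row sums follow Source B step for step.
structure Mat3 where
  a : Int
  b : Int
  c : Int
  d : Int
  e : Int
  f : Int
  g : Int
  h : Int
  i : Int
deriving DecidableEq, Repr

def mmulB (A B : Mat3) : Mat3 :=
  ⟨A.a*B.a + A.b*B.d + A.c*B.g, A.a*B.b + A.b*B.e + A.c*B.h, A.a*B.c + A.b*B.f + A.c*B.i,
   A.d*B.a + A.e*B.d + A.f*B.g, A.d*B.b + A.e*B.e + A.f*B.h, A.d*B.c + A.e*B.f + A.f*B.i,
   A.g*B.a + A.h*B.d + A.i*B.g, A.g*B.b + A.h*B.e + A.i*B.h, A.g*B.c + A.h*B.f + A.i*B.i⟩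

def matIdB : Mat3 := ⟨1, 0, 0, 0, 1, 0, 0, 0, 1⟩

def matpowB (M : Mat3) (k : Nat) : Mat3 :=
  if hk : k = 0 then matIdB
  else
    let H := matpowB M (k / 2)
    let S := mmulB H H
    if k % 2 = 0 then S else mmulB S M
decreasing_by exact Nat.div_lt_self (Nat.pos_of_ne_zero hk) (by omega)

-- the recurrence matrix M from Source B
def Mfib : Mat3 := ⟨1, 0, 1, 1, 0, 0, 0, 1, 0⟩

def caminos_restringidos_alt (n : Int) : Int :=
  if n ≤ 0 then 0
  else if n = 1 then 1
  else if n = 2 then 1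
  else if n = 3 then 2
  else
    -- the exponent n-3 is a positive count here (n ≥ 4)
    let P := matpowB Mfib (n - 3).toNat
    -- w = P · (1,1,1): the three row sums
    let w0 := P.a + P.b + P.c
    let w1 := P.d + P.e + P.f
    let w2 := P.g + P.h + P.i
    w0 + w2

-- ===== PRECONDITION & SPEC =====
def Spec_caminos_restringidos (n : Int) (out : Int) : Prop := out = caminos_restringidos_alt n
instance (n : Int) (out : Int) : Decidable (Spec_caminos_restringidos n out) := by unfold Spec_caminos_restringidos; infer_instance

-- ===== CLAIM (what is proved, stated in full; the proofs are below) =====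
def Claim_equal_caminos_restringidos : Prop := ∀ (n : Int), Dom_caminos_restringidos n → Spec_caminos_restringidos n (caminos_restringidos n)

-- ===== LEMMAS AND PROOFS =====

-- the underlying sequence: x_0=0, x_1=x_2=1, x_{k+3} = x_{k+2} + x_k
def X : Nat → Int
  | 0 => 0
  | 1 => 1
  | 2 => 1
  | (k + 3) => X (k + 2) + X k

-- ---- B side ----
def npowB (M : Mat3) : Nat → Mat3
  | 0 => matIdB
  | (k + 1) => mmulB (npowB M k) M

theorem mmulB_assoc (A B C : Mat3) : mmulB (mmulB A B) C = mmulB A (mmulB B C) := by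
  simp only [mmulB, Mat3.mk.injEq]
  refine ⟨?_, ?_, ?_, ?_, ?_, ?_, ?_, ?_, ?_⟩ <;> ring

theorem mmulB_id_left (A : Mat3) : mmulB matIdB A = A := by
  cases A; simp [mmulB, matIdB]

theorem mmulB_id_right (A : Mat3) : mmulB A matIdB = A := by
  cases A; simp [mmulB, matIdB]

theorem npowB_add (M : Mat3) (a b : Nat) :
    npowB M (a + b) = mmulB (npowB M a) (npowB M b) := by
  induction b with
  | zero => simp [npowB, mmulB_id_right]
  | succ b ih => rw [← Nat.add_assoc]; simp [npowB, ih, mmulB_assoc]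

theorem matpowB_eq (M : Mat3) (k : Nat) : matpowB M k = npowB M k := by
  induction k using Nat.strong_induction_on with
  | _ k ih =>
    rw [matpowB]
    by_cases hk : k = 0
    · simp [hk, npowB]
    · rw [dif_neg hk]
      have h2 : k / 2 < k := Nat.div_lt_self (Nat.pos_of_ne_zero hk) (by omega)
      rw [ih _ h2]
      by_cases he : k % 2 = 0
      · rw [if_pos he, ← npowB_add]
        conv_rhs => rw [show k = k / 2 + k / 2 from by omega]
      · rw [if_neg he, ← npowB_add]
        conv_rhs => rw [show k = k / 2 + k / 2 + 1 from by omega]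
        rw [npowB]

-- row sums: P · (1,1,1)
def rowsB (P : Mat3) : Int × Int × Int := (P.a + P.b + P.c, P.d + P.e + P.f, P.g + P.h + P.i)

theorem npowB_succ_left (M : Mat3) (k : Nat) :
    npowB M (k + 1) = mmulB M (npowB M k) := by
  rw [show k + 1 = 1 + k by omega, npowB_add]
  simp [npowB, mmulB_id_left]

theorem rowsB_npow (k : Nat) :
    rowsB (npowB Mfib k) = (X (k + 3), X (k + 2), X (k + 1)) := by
  induction k with
  | zero => simp [npowB, rowsB, matIdB, X]
  | succ k ih =>
    rw [npowB_succ_left]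
    have h := ih
    simp only [rowsB, Prod.mk.injEq] at h ⊢
    obtain ⟨h1, h2, h3⟩ := h
    cases hP : npowB Mfib k
    rw [hP] at h1 h2 h3
    simp only [mmulB, Mfib] at *
    refine ⟨?_, ?_, ?_⟩
    · show _ = X (k + 4)
      rw [show k + 4 = (k + 1) + 3 from rfl, X]
      rw [← h1, ← h3]; ring
    · rw [← h1]; ring
    · rw [← h2]; ring

-- B's value for n ≥ 2 in closed form
theorem alt_eq_X (n : Int) (hn : 2 ≤ n) :
    caminos_restringidos_alt n = X n.toNat + X (n.toNat - 2) := by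
  unfold caminos_restringidos_alt
  rw [if_neg (by omega), if_neg (by omega)]
  by_cases h2 : n = 2
  · subst h2; decide
  by_cases h3 : n = 3
  · subst h3; decide
  rw [if_neg h2, if_neg h3]
  have h4 : 4 ≤ n := by omega
  have hrows := rowsB_npow (n - 3).toNat
  rw [← matpowB_eq] at hrows
  simp only [rowsB, Prod.mk.injEq] at hrows
  obtain ⟨h1, _, hh3⟩ := hrows
  have e1 : (n - 3).toNat + 3 = n.toNat := by omega
  have e2 : (n - 3).toNat + 1 = n.toNat - 2 := by omega
  rw [e1] at h1
  rw [e2] at hh3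
  simp only []
  rw [h1, hh3]

-- ---- A side ----
-- the table entry at index j after the loop has processed i = 2..m
def entA (m j : Nat) : Int × Int :=
  if j = 0 then (0, 0)
  else if j ≤ m then (X j, if 2 ≤ j then X (j - 2) else 0)
  else (0, 0)

def DstA (n : Int) (m : Nat) : List (Int × Int) := (List.range (n + 1).toNat).map (entA m)

theorem X_succ (m : Nat) (hm : 1 ≤ m) :
    X (m + 1) = X m + (if 2 ≤ m then X (m - 2) else 0) := by
  match m, hm with
  | 1, _ => simp [X]
  | (k + 2), _ => simp [X, show k + 2 + 1 = k + 3 from rfl]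

theorem length_DstA (n : Int) (m : Nat) : (DstA n m).length = (n + 1).toNat := by
  simp [DstA]

theorem getD_DstA (n : Int) (m j : Nat) (hj : j < (n + 1).toNat) :
    (DstA n m).getD j (0, 0) = entA m j := by
  rw [List.getD_eq_getElem _ _ (by rw [length_DstA]; exact hj)]
  simp only [DstA, List.getElem_map, List.getElem_range]

theorem init_eq_DstA (n : Int) (_hn : 2 ≤ n) :
    PySem.List.pySetD (List.replicate (n + 1).toNat ((0 : Int), (0 : Int))) 1 (1, 0)
      = DstA n 1 := by
  have h1 : ((1 : Int)) = ((1 : Nat) : Int) := by norm_num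
  rw [h1, PySem.List.pySetD_natCast]
  apply List.ext_getElem
  · simp [DstA]
  · intro i h₁ h₂
    simp only [List.getElem_set, List.getElem_replicate, DstA, List.getElem_map,
      List.getElem_range]
    by_cases hi : 1 = i
    · subst hi; simp [entA, X]
    · simp only [hi, if_false, entA]
      have : ¬ (i ≠ 0 ∧ i ≤ 1) := by omega
      by_cases h0 : i = 0
      · simp [h0]
      · rw [if_neg h0, if_neg (by omega)]

-- the loop body, written let-free (the zeta-expansion of the port's fold body)
def stepA1 (dp : List (Int × Int)) (i : Int) : List (Int × Int) :=
  PySem.List.pySetD dp i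
    ((PySem.List.pyGetD dp (i - 1) (0, 0)).1 + (PySem.List.pyGetD dp (i - 1) (0, 0)).2,
     (PySem.List.pyGetD dp i (0, 0)).2)

def stepA (dp : List (Int × Int)) (i : Int) : List (Int × Int) :=
  PySem.List.pySetD (stepA1 dp i) i
    ((PySem.List.pyGetD (stepA1 dp i) i (0, 0)).1,
     (PySem.List.pyGetD (stepA1 dp i) (i - 2) (0, 0)).1)

theorem step_DstA (n : Int) (m : Nat) (hm : 1 ≤ m) (hmn : (m : Int) + 1 ≤ n) :
    stepA (DstA n m) ((m : Int) + 1) = DstA n (m + 1) := by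
  have hlen : m + 1 < (n + 1).toNat := by omega
  have e1 : ((m : Int) + 1) - 1 = ((m : Nat) : Int) := by ring
  have e2 : ((m : Int) + 1) = (((m + 1 : Nat)) : Int) := by push_cast; ring
  have e3 : (((m + 1 : Nat) : Int)) - 2 = (((m - 1 : Nat)) : Int) := by omega
  unfold stepA stepA1
  rw [e1, e2, e3]
  rw [PySem.List.pyGetD_natCast, PySem.List.pyGetD_natCast, PySem.List.pySetD_natCast]
  rw [getD_DstA n m m (by omega), getD_DstA n m (m + 1) hlen]
  have hset : ∀ (v : Int × Int) (j : Nat), j < (n + 1).toNat →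
      ((DstA n m).set (m + 1) v).getD j (0, 0) = if j = m + 1 then v else entA m j := by
    intro v j hj
    rw [List.getD_eq_getElem _ _ (by simp [length_DstA]; omega)]
    rw [List.getElem_set]
    by_cases hjm : m + 1 = j
    · simp [hjm]
    · rw [if_neg hjm, if_neg (by omega)]
      rw [← getD_DstA n m j hj, List.getD_eq_getElem _ _ (by rw [length_DstA]; exact hj)]
  rw [PySem.List.pyGetD_natCast, PySem.List.pyGetD_natCast, PySem.List.pySetD_natCast]
  rw [hset _ (m - 1) (by omega), hset _ (m + 1) hlen]
  rw [if_pos (rfl : m + 1 = m + 1), if_neg (show ¬ (m - 1 = m + 1) by omega)]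
  have hent_m : entA m m = (X m, if 2 ≤ m then X (m - 2) else 0) := by
    simp [entA, show ¬ m = 0 by omega]
  have hent_m1 : entA m (m + 1) = (0, 0) := by
    simp [entA, show ¬ m + 1 ≤ m by omega]
  rw [hent_m, hent_m1, List.set_set]
  -- identify the resulting list with DstA n (m+1)
  apply List.ext_getElem
  · simp [DstA]
  · intro j h₁ h₂
    rw [List.getElem_set]
    simp only [DstA, List.getElem_map, List.getElem_range]
    by_cases hj : m + 1 = j
    · subst hj
      simp only [entA, show ¬ m + 1 = 0 by omega, if_false,
        show m + 1 ≤ m + 1 by omega, if_true]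
      have hxs : X m + (if 2 ≤ m then X (m - 2) else 0) = X (m + 1) := (X_succ m hm).symm
      rw [if_pos (show 2 ≤ m + 1 by omega)]
      by_cases h1 : m = 1
      · subst h1; simp [X]
      · rw [if_neg (show ¬ m - 1 = 0 by omega), if_pos (show m - 1 ≤ m by omega)]
        simp only [Prod.mk.injEq]
        exact ⟨hxs, rfl⟩
    · rw [if_neg hj]
      simp only [entA]
      by_cases h0 : j = 0
      · simp [h0]
      · rw [if_neg h0, if_neg h0]
        by_cases hle : j ≤ m
        · rw [if_pos hle, if_pos (show j ≤ m + 1 by omega)]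
        · rw [if_neg hle, if_neg (show ¬ j ≤ m + 1 by omega)]

theorem fold_DstA (n : Int) (_hn : 2 ≤ n) (k : Nat) (hk : (2 : Int) + k ≤ n + 1) :
    (PySem.List.pyRange 2 (2 + (k : Int)) 1).foldl stepA (DstA n 1) = DstA n (1 + k) := by
  induction k with
  | zero => simp [PySem.List.pyRange_one_eq_nil]
  | succ k ih =>
    have h1 : (2 : Int) + k ≤ n + 1 := by push_cast at hk ⊢; omega
    have e : (2 : Int) + ((k : Nat) + 1 : Nat) = (2 + (k : Int)) + 1 := by push_cast; ring
    rw [e, PySem.List.pyRange_one_succ_right (by omega), List.foldl_append]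
    rw [ih h1]
    simp only [List.foldl_cons, List.foldl_nil]
    have e2 : (2 : Int) + (k : Int) = ((1 + k : Nat) : Int) + 1 := by push_cast; ring
    rw [e2, step_DstA n (1 + k) (by omega) (by push_cast at hk ⊢; omega)]
    congr 1

theorem a_eq_X (n : Int) (hn : 2 ≤ n) :
    caminos_restringidos n = X n.toNat + X (n.toNat - 2) := by
  lift n to Nat using (by omega) with m
  have hm : 2 ≤ m := by exact_mod_cast hn
  simp only [caminos_restringidos]
  rw [if_neg (by omega), if_neg (by omega)]
  have hstep : (fun (dp : List (Int × Int)) (i : Int) =>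
      let p := PySem.List.pyGetD dp (i - 1) (0, 0)
      let c := PySem.List.pyGetD dp i (0, 0)
      let dp := PySem.List.pySetD dp i (p.1 + p.2, c.2)
      let q := PySem.List.pyGetD dp (i - 2) (0, 0)
      let c2 := PySem.List.pyGetD dp i (0, 0)
      PySem.List.pySetD dp i (c2.1, q.1)) = stepA := rfl
  rw [hstep, init_eq_DstA (m : Int) (by omega)]
  have e : (m : Int) + 1 = 2 + ((m - 1 : Nat) : Int) := by omega
  rw [e, fold_DstA (m : Int) (by omega) (m - 1) (by omega)]
  rw [show 1 + (m - 1) = m from by omega]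
  rw [PySem.List.pyGetD_natCast, getD_DstA (m : Int) m m (by omega)]
  rw [show entA m m = (X m, if 2 ≤ m then X (m - 2) else 0) from by
    simp [entA, show ¬ m = 0 by omega]]
  rw [if_pos hm]
  simp

-- ===== VERDICT (by name: the statement is the Claim_ definition above) =====
theorem caminos_restringidos_spec : Claim_equal_caminos_restringidos := by
  intro n _
  unfold Spec_caminos_restringidos
  by_cases h0 : n ≤ 0
  · unfold caminos_restringidos caminos_restringidos_alt
    rw [if_pos h0, if_pos h0]
  by_cases h1 : n = 1
  · subst h1; decide
  · rw [a_eq_X n (by omega), alt_eq_X n (by omega)]
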